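-- pv_equiv track=rewrite | github.com/HackFeed/Python_2nd_sem_labs | BMSTUlab2/BMSTUlab2_heapsort.py | step_by_step_heapsort
-- ===== SOURCE A (Python) =====
-- def heapify(in_list, n, i):
--     """ Функция формирования кучи (фактически бинарное дерево).
--
--     Передаваемые параметры:
--     * in_list - исходный список
--     * n - длина списка
--     * i - текущий узел кучи
--
--     Функция изменяет передаваемый массив, а не создаёт копию и
--     работает с ней.
--
--     """
--
--     largest_node = i  # Инициализировать корень как наибольший узел
--     left_s = 2 * i + 1  # Инициализация левого поддерева
--     right_s = 2 * i + 2  # Инициализация правого поддерева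
--
--     """ Проверка на существование левых и правх поддеревьев
--     и сравнение их с корнем. """
--     if left_s < n and in_list[i] < in_list[left_s]:
--         largest_node = left_s
--
--     if right_s < n and in_list[largest_node] < in_list[right_s]:
--         largest_node = right_s
--
--     """ Смена корня. """
--     if largest_node != i:
--         in_list[i], in_list[largest_node] = in_list[largest_node], in_list[i]
--
--         """ Новое формирование кучи. """
--         heapify(in_list, n, largest_node)
--
-- def step_by_step_heapsort(in_list):
--     """ Аналог функции heapsort, только с выводом
--     каждого шага в консоль.
--
--     Передаваемые параметры:
--     * in_list - исходный список
--
--     Возвращаемые значения: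
--     * res_str - ход действий для сортировки списка
--
--     """
--
--     res_str = ""
--
--     try:
--         n = len(in_list)
--         for i in range(n, -1, -1):
--             heapify(in_list, n, i)
--             in_list_cp = in_list[:]
--         res_str += "Формируем максимальную кучу\n" + str(in_list_cp) + "\n"
--
--         for i in range(n - 1, 0, -1):
--             in_list[i], in_list[0] = in_list[0], in_list[i]
--             in_list_cp = in_list[:]
--             res_str += "Меняем корень с последним узлом\n" + \
--                 str(in_list_cp) + "\n"
--             heapify(in_list, i, 0)
--             in_list_cp = in_list[:]
--             res_str += "Формируем максимальную кучу\n" + str(in_list_cp) + "\n"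
--
--         return res_str
--
--     except TypeError:
--         return res_str
-- ===== SOURCE B (Python) =====
-- def _sift_down(a, n, i):
--     v = a[i]
--     while True:
--         child = 2 * i + 1
--         if child >= n:
--             return
--         right = child + 1
--         c = a[child]
--         if right < n and a[right] > c:
--             child = right
--             c = a[child]
--         if c <= v:
--             return
--         a[i], a[child] = c, v
--         i = child
--
-- def step_by_step_heapsort(in_list):
--     n = len(in_list)
--     parts = []
--     append = parts.append
--     for start in range(n - 1, -1, -1):
--         _sift_down(in_list, n, start)
--     append("Формируем максимальную кучу\n")
--     append(str(in_list)); append("\n")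
--     for end in range(n - 1, 0, -1):
--         in_list[0], in_list[end] = in_list[end], in_list[0]
--         append("Меняем корень с последним узлом\n")
--         append(str(in_list)); append("\n")
--         _sift_down(in_list, end, 0)
--         append("Формируем максимальную кучу\n")
--         append(str(in_list)); append("\n")
--     return "".join(parts)
-- ===== Notes on version B (the rewrite author's own statement) =====
-- stated objective: alternative
-- what changed: Recursive heapify (two sequential root-vs-child ifs) is replacedced by an iterative larger-child sift-down loop that caches the moving value, and the log is collected as a list of parts joined once at the end instead of repeated string concatenation.
import Mathlib
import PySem

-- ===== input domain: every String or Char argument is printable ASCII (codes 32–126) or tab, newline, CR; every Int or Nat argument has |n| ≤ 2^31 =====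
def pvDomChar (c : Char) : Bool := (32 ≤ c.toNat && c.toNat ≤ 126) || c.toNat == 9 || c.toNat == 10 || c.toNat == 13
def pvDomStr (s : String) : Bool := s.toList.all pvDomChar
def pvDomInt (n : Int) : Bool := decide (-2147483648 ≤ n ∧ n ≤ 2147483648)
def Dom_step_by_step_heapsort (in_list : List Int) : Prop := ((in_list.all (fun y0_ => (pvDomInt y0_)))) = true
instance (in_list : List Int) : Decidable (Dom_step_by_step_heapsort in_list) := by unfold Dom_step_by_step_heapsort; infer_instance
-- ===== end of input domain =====

-- B replaces the recursive heapify (tie-preference encoded by two sequential ifs) with an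
-- iterative larger-child sift-down and collects the log as a list of parts joined once at the end;
-- same swaps, same snapshots, same return value. Both A and B mutate in_list in place (Python);
-- the equivalence proved here is about the return value.


-- shared by both ports: Python's `str(list_of_ints)`
def pyStrList (l : List Int) : String :=
  "[" ++ String.intercalate ", " (l.map PySem.Int.toStr) ++ "]"

-- Python's simultaneous assignment `a[i], a[j] = a[j], a[i]` (indices in range on all uses here)
def pvSwap (l : List Int) (i j : Nat) : List Int :=
  (l.set i (l.getD j 0)).set j (l.getD i 0)

-- ===== PORT A =====
-- recursive heapify, exactly A's two sequential comparisons
def heapifyA (l : List Int) (n i : Nat) : List Int :=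
  let largest1 := if 2 * i + 1 < n ∧ l.getD i 0 < l.getD (2 * i + 1) 0 then 2 * i + 1 else i
  let largest := if 2 * i + 2 < n ∧ l.getD largest1 0 < l.getD (2 * i + 2) 0 then 2 * i + 2 else largest1
  if _h : largest ≠ i then heapifyA (pvSwap l i largest) n largest else l
termination_by n - i
decreasing_by
  simp only [largest, largest1] at *
  split_ifs at * <;> omega

def step_by_step_heapsort (in_list : List Int) : String :=
  let n := in_list.length
  -- for i in range(n, -1, -1): heapify(in_list, n, i)
  let l1 := ((List.range (n + 1)).reverse).foldl (fun acc i => heapifyA acc n i) in_list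
  let res0 := "" ++ "Формируем максимальную кучу\n" ++ pyStrList l1 ++ "\n"
  -- for i in range(n - 1, 0, -1): …
  let st := ((List.range' 1 (n - 1)).reverse).foldl
    (fun (st : List Int × String) i =>
      let l' := pvSwap st.1 i 0
      let s' := st.2 ++ "Меняем корень с последним узлом\n" ++ pyStrList l' ++ "\n"
      let l'' := heapifyA l' i 0
      (l'', s' ++ "Формируем максимальную кучу\n" ++ pyStrList l'' ++ "\n"))
    (l1, res0)
  st.2

-- ===== PORT B =====
-- the while-loop of _sift_down: v is the cached a[i], maintained across iterations
def siftGo (l : List Int) (n i : Nat) (v : Int) : List Int :=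
  let child := 2 * i + 1
  if _h1 : n ≤ child then l
  else
    let c := l.getD child 0
    let cc := if child + 1 < n ∧ l.getD (child + 1) 0 > c then (child + 1, l.getD (child + 1) 0)
              else (child, c)
    if _h2 : cc.2 ≤ v then l
    else siftGo ((l.set i cc.2).set cc.1 v) n cc.1 v
termination_by n - i
decreasing_by
  simp only [cc, child] at *
  split_ifs at * <;> simp_all <;> omega

-- iterative sift-down: pick the larger child, move the node down while the child beats it
def siftB (l : List Int) (n i : Nat) : List Int := siftGo l n i (l.getD i 0)

def step_by_step_heapsort_alt (in_list : List Int) : String :=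
  let n := in_list.length
  let l1 := ((List.range n).reverse).foldl (fun acc i => siftB acc n i) in_list
  let st := ((List.range' 1 (n - 1)).reverse).foldl
    (fun (st : List Int × List String) e =>
      let l' := pvSwap st.1 0 e
      let parts := st.2 ++ ["Меняем корень с последним узлом\n", pyStrList l', "\n"]
      let l'' := siftB l' e 0
      (l'', parts ++ ["Формируем максимальную кучу\n", pyStrList l'', "\n"]))
    (l1, ["Формируем максимальную кучу\n", pyStrList l1, "\n"])
  PySem.Str.join "" st.2

-- ===== PRECONDITION & SPEC =====
def Spec_step_by_step_heapsort (in_list : List Int) (out : String) : Prop := out = step_by_step_heapsort_alt in_list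
instance (in_list : List Int) (out : String) : Decidable (Spec_step_by_step_heapsort in_list out) := by unfold Spec_step_by_step_heapsort; infer_instance

-- ===== CLAIM (what is proved, stated in full; the proofs are below) =====
def Claim_equal_step_by_step_heapsort : Prop := ∀ (in_list : List Int), Dom_step_by_step_heapsort in_list → Spec_step_by_step_heapsort in_list (step_by_step_heapsort in_list)


-- ===== LEMMAS AND PROOFS =====

-- concatenation of B's collected parts: what Python's "".join computes
def cat : List String → String
  | [] => ""
  | x :: xs => x ++ cat xs

theorem cat_append (xs ys : List String) : cat (xs ++ ys) = cat xs ++ cat ys := by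
  induction xs with
  | nil => simp [cat]
  | cons x xs ih => simp [cat, ih, String.append_assoc]

theorem join_empty_eq_cat (xs : List String) : PySem.Str.join "" xs = cat xs := by
  induction xs with
  | nil =>
    apply String.toList_injective
    simp [PySem.Chars.join_nil, cat]
  | cons x xs ih =>
    cases xs with
    | nil =>
      have h : PySem.Str.join "" [x] = x := by
        apply String.toList_injective
        simp [PySem.Chars.join_singleton]
      rw [h]; simp [cat]
    | cons y ys =>
      have h : PySem.Str.join "" (x :: y :: ys) = x ++ "" ++ PySem.Str.join "" (y :: ys) := by
        apply String.toList_injective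
        simp [PySem.Chars.join_cons_cons]
      rw [h, ih]
      simp [cat]

theorem pvSwap_comm (l : List Int) (i j : Nat) : pvSwap l i j = pvSwap l j i := by
  by_cases h : i = j
  · subst h; rfl
  · unfold pvSwap; exact List.set_comm _ _ h

theorem getD_set2_self (xs : List Int) (a b : Nat) (x y : Int) (hb : b < xs.length) :
    ((xs.set a x).set b y).getD b 0 = y := by
  simp [List.getD, hb]

theorem heapify_eq_sift_aux : ∀ (k : Nat) (l : List Int) (n i : Nat) (v : Int),
    n ≤ l.length → n - i ≤ k → v = l.getD i 0 → heapifyA l n i = siftGo l n i v := by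
  intro k
  induction k with
  | zero =>
    intro l n i v _hlen h hv
    rw [heapifyA, siftGo]
    dsimp only
    split_ifs <;> first | rfl | (exfalso; omega)
  | succ k ih =>
    intro l n i v hlen h hv
    subst hv
    rw [heapifyA, siftGo]
    dsimp only
    have e : 2 * i + 1 + 1 = 2 * i + 2 := rfl
    simp only [e]
    have key : ∀ j : Nat, i < j → j < n →
        heapifyA (pvSwap l i j) n j
          = siftGo ((l.set i (l.getD j 0)).set j (l.getD i 0)) n j (l.getD i 0) := by
      intro j hij hjn
      have hx : (l.set i (l.getD j 0)).set j (l.getD i 0) = pvSwap l i j := rfl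
      rw [hx]
      apply ih (pvSwap l i j) n j
      · simpa [pvSwap] using hlen
      · omega
      · symm
        apply getD_set2_self
        have : (l.set i (l.getD j 0)).length = l.length := List.length_set ..
        omega
    split_ifs <;> first | rfl | (exfalso; omega) | (exact key _ (by omega) (by omega))

theorem heapifyA_eq_siftB (l : List Int) (n i : Nat) (hlen : n ≤ l.length) :
    heapifyA l n i = siftB l n i :=
  heapify_eq_sift_aux (n - i) l n i _ hlen le_rfl rfl

theorem siftB_self (l : List Int) (n : Nat) : siftB l n n = l := by
  rw [siftB, siftGo]; dsimp only; rw [dif_pos (by omega)]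

theorem siftGo_length : ∀ (k : Nat) (l : List Int) (n i : Nat) (v : Int),
    n - i ≤ k → (siftGo l n i v).length = l.length := by
  intro k
  induction k with
  | zero =>
    intro l n i v h
    rw [siftGo]; dsimp only
    split_ifs <;> first | rfl | (exfalso; omega)
  | succ k ih =>
    intro l n i v h
    rw [siftGo]; dsimp only
    split_ifs <;> first | rfl | (rw [ih _ _ _ _ (by omega)]; simp)

theorem siftB_length (l : List Int) (n i : Nat) : (siftB l n i).length = l.length :=
  siftGo_length (n - i) l n i _ le_rfl

theorem fold_heap_eq_fold_sift (nn : Nat) : ∀ (idxs : List Nat) (l : List Int), nn ≤ l.length →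
    idxs.foldl (fun acc j => heapifyA acc nn j) l = idxs.foldl (fun acc j => siftB acc nn j) l := by
  intro idxs
  induction idxs with
  | nil => intro l _; rfl
  | cons j idxs ih =>
    intro l hlen
    rw [List.foldl_cons, List.foldl_cons, heapifyA_eq_siftB _ _ _ hlen]
    exact ih _ (by rw [siftB_length]; exact hlen)

theorem fold_sift_length (nn : Nat) : ∀ (idxs : List Nat) (l : List Int),
    (idxs.foldl (fun acc j => siftB acc nn j) l).length = l.length := by
  intro idxs
  induction idxs with
  | nil => intro l; rfl
  | cons j idxs ih => intro l; rw [List.foldl_cons, ih, siftB_length]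

-- joint invariant of the two second loops: the list states coincide and A's string is the concatenation of B's parts
theorem loop_eq : ∀ (idxs : List Nat) (l : List Int) (s : String) (lines : List String),
    (∀ j ∈ idxs, j ≤ l.length) → s = cat lines →
    (idxs.foldl (fun (st : List Int × String) i =>
      let l' := pvSwap st.1 i 0
      let s' := st.2 ++ "Меняем корень с последним узлом\n" ++ pyStrList l' ++ "\n"
      let l'' := heapifyA l' i 0
      (l'', s' ++ "Формируем максимальную кучу\n" ++ pyStrList l'' ++ "\n")) (l, s)).1
    = (idxs.foldl (fun (st : List Int × List String) e =>
      let l' := pvSwap st.1 0 e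
      let parts := st.2 ++ ["Меняем корень с последним узлом\n", pyStrList l', "\n"]
      let l'' := siftB l' e 0
      (l'', parts ++ ["Формируем максимальную кучу\n", pyStrList l'', "\n"])) (l, lines)).1
    ∧
    (idxs.foldl (fun (st : List Int × String) i =>
      let l' := pvSwap st.1 i 0
      let s' := st.2 ++ "Меняем корень с последним узлом\n" ++ pyStrList l' ++ "\n"
      let l'' := heapifyA l' i 0
      (l'', s' ++ "Формируем максимальную кучу\n" ++ pyStrList l'' ++ "\n")) (l, s)).2
    = cat ((idxs.foldl (fun (st : List Int × List String) e =>
      let l' := pvSwap st.1 0 e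
      let parts := st.2 ++ ["Меняем корень с последним узлом\n", pyStrList l', "\n"]
      let l'' := siftB l' e 0
      (l'', parts ++ ["Формируем максимальную кучу\n", pyStrList l'', "\n"])) (l, lines)).2) := by
  intro idxs
  induction idxs with
  | nil => intro l s lines _ h; exact ⟨rfl, h⟩
  | cons i idxs ih =>
    intro l s lines hidx h
    simp only [List.foldl_cons]
    rw [pvSwap_comm l i 0, heapifyA_eq_siftB _ _ _ (by
      simp only [pvSwap, List.length_set]
      exact hidx i (List.mem_cons_self))]
    apply ih
    · intro j hj
      have := hidx j (List.mem_cons_of_mem _ hj)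
      simpa [pvSwap, siftB_length] using this
    subst h
    simp [cat_append, cat, String.append_assoc]
    rw [show ("\nФормируем максимальную кучу\n" : String)
      = "\n" ++ "Формируем максимальную кучу\n" from rfl, String.append_assoc]

-- ===== VERDICT (by name: the statement is the Claim_ definition above) =====
theorem step_by_step_heapsort_spec : Claim_equal_step_by_step_heapsort := by
  intro in_list _dom
  unfold Spec_step_by_step_heapsort step_by_step_heapsort step_by_step_heapsort_alt
  dsimp only
  have h0 : heapifyA in_list in_list.length in_list.length = in_list := by
    rw [heapifyA_eq_siftB _ _ _ le_rfl, siftB_self]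
  rw [List.range_succ, List.reverse_append, List.reverse_singleton, List.singleton_append,
    List.foldl_cons, h0, fold_heap_eq_fold_sift _ _ _ le_rfl]
  set l1 := ((List.range in_list.length).reverse).foldl
    (fun acc i => siftB acc in_list.length i) in_list with hl1
  have hinit : "" ++ "Формируем максимальную кучу\n" ++ pyStrList l1 ++ "\n"
      = cat ["Формируем максимальную кучу\n", pyStrList l1, "\n"] := by
    simp [cat, String.append_assoc]
  have hl1len : l1.length = in_list.length := by
    rw [hl1]; exact fold_sift_length _ _ _
  have hidx : ∀ j ∈ (List.range' 1 (in_list.length - 1)).reverse, j ≤ l1.length := by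
    intro j hj
    rw [List.mem_reverse] at hj
    have := (List.mem_range'_1).1 hj
    omega
  obtain ⟨hfst, hsnd⟩ := loop_eq ((List.range' 1 (in_list.length - 1)).reverse) l1
    ("" ++ "Формируем максимальную кучу\n" ++ pyStrList l1 ++ "\n")
    ["Формируем максимальную кучу\n", pyStrList l1, "\n"] hidx hinit
  rw [hsnd, join_empty_eq_cat]
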